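-- pv_equiv track=rewrite | github.com/GrandGelo/trademark-checker | app.py | calculate_registration_chance
-- ===== SOURCE A (Python) =====
-- def calculate_registration_chance(results):
--     if not results:
--         return 95
--     max_risk = max([result.get('overall_risk', 0) for result in results])
--     if max_risk > 80:
--         return 10
--     elif max_risk > 60:
--         return 30
--     elif max_risk > 40:
--         return 60
--     elif max_risk > 20:
--         return 80
--     else:
--         return 95
-- ===== SOURCE B (Python) =====
-- def calculate_registration_chance(results):
--     chance = 95
--     for result in results:
--         risk = result.get('overall_risk', 0)
--         c = 10 if risk > 80 else 30 if risk > 60 else 60 if risk > 40 else 80 if risk > 20 else 95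
--         if c < chance:
--             chance = c
--     return chance
-- ===== Notes on version B (the rewrite author's own statement) =====
-- stated objective: alternative
-- what changed: Instead of computing max(overall_risk) and then mapping it through the threshold ladder, B maps each result's risk to its own chance and folds a running minimum in a single accumulator pass with no max() call and no empty-list guard; correct because the risk-to-chance mapping is antitone.
import Mathlib
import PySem

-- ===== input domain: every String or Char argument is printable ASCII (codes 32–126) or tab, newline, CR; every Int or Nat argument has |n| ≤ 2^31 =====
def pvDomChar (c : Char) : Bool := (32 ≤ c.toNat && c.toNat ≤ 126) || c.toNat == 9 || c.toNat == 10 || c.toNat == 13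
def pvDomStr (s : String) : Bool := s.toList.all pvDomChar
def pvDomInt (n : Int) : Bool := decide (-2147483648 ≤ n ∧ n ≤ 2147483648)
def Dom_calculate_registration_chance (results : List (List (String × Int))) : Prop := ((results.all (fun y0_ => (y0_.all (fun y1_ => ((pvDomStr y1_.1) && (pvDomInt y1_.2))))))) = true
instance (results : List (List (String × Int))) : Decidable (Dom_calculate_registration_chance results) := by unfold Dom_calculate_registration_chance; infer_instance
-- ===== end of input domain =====

-- B maps each result's risk to its own chance and folds a running minimum (no max() call, no empty guard); same O(n) cost.

-- ===== PORT A =====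
def calculate_registration_chance (results : List (List (String × Int))) : Int :=
  if results = [] then 95
  else
    match PySem.List.max? (results.map (fun result => PySem.Dict.getD (PySem.Dict.ofList result) "overall_risk" 0)) (fun x => x) with
    | none => 95  -- unreachable: the list is nonempty
    | some max_risk =>
      if max_risk > 80 then 10
      else if max_risk > 60 then 30
      else if max_risk > 40 then 60
      else if max_risk > 20 then 80
      else 95

-- ===== PORT B =====
-- the per-result conditional expression of Source B's loop body
def pvChanceOf (risk : Int) : Int :=
  if risk > 80 then 10 else if risk > 60 then 30 else if risk > 40 then 60
  else if risk > 20 then 80 else 95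

def calculate_registration_chance_alt (results : List (List (String × Int))) : Int :=
  results.foldl (fun chance result =>
    let c := pvChanceOf (PySem.Dict.getD (PySem.Dict.ofList result) "overall_risk" 0)
    if c < chance then c else chance) 95

-- ===== PRECONDITION & SPEC =====
def Spec_calculate_registration_chance (results : List (List (String × Int))) (out : Int) : Prop := out = calculate_registration_chance_alt results
instance (results : List (List (String × Int))) (out : Int) : Decidable (Spec_calculate_registration_chance results out) := by unfold Spec_calculate_registration_chance; infer_instance

-- ===== CLAIM (what is proved, stated in full; the proofs are below) =====
def Claim_equal_calculate_registration_chance : Prop := ∀ (results : List (List (String × Int))), Dom_calculate_registration_chance results → Spec_calculate_registration_chance results (calculate_registration_chance results)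

-- ===== LEMMAS AND PROOFS =====
theorem pvChanceOf_max (u v : Int) : pvChanceOf (max u v) = min (pvChanceOf u) (pvChanceOf v) := by
  unfold pvChanceOf; rcases le_total u v with h | h <;> split_ifs <;> omega

theorem pv_foldl_max_pull (t : List Int) (x y : Int) :
    t.foldl max (max x y) = max x (t.foldl max y) := by
  induction t generalizing y with
  | nil => rfl
  | cons z t ih =>
    simp only [List.foldl_cons, max_assoc, ih]

theorem pv_min_fold (t : List Int) (x a : Int) :
    (x :: t).foldl (fun acc r => if pvChanceOf r < acc then pvChanceOf r else acc) a
    = min a (pvChanceOf (t.foldl max x)) := by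
  induction t generalizing x a with
  | nil =>
    simp only [List.foldl_cons, List.foldl_nil]
    split_ifs <;> omega
  | cons y t ih =>
    simp only [List.foldl_cons] at ih ⊢
    rw [ih y (if pvChanceOf x < a then pvChanceOf x else a),
        pv_foldl_max_pull, pvChanceOf_max]
    split_ifs <;> omega

theorem pvChanceOf_le (r : Int) : pvChanceOf r ≤ 95 := by
  unfold pvChanceOf; split_ifs <;> omega

-- ===== VERDICT (by name: the statement is the Claim_ definition above) =====
theorem calculate_registration_chance_spec : Claim_equal_calculate_registration_chance := by
  intro results _
  unfold Spec_calculate_registration_chance calculate_registration_chance calculate_registration_chance_alt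
  cases results with
  | nil => rfl
  | cons r rs =>
    simp only [if_neg (List.cons_ne_nil r rs), List.map_cons, PySem.List.max?_id_cons]
    rw [show (fun chance result =>
          let c := pvChanceOf (PySem.Dict.getD (PySem.Dict.ofList result) "overall_risk" 0)
          if c < chance then c else chance)
        = (fun chance result =>
          if pvChanceOf (PySem.Dict.getD (PySem.Dict.ofList result) "overall_risk" 0) < chance
          then pvChanceOf (PySem.Dict.getD (PySem.Dict.ofList result) "overall_risk" 0) else chance) from rfl]
    rw [← List.foldl_map (f := fun result => PySem.Dict.getD (PySem.Dict.ofList result) "overall_risk" 0)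
          (g := fun acc r => if pvChanceOf r < acc then pvChanceOf r else acc)]
    rw [List.map_cons, pv_min_fold]
    have := pvChanceOf_le ((rs.map (fun result => PySem.Dict.getD (PySem.Dict.ofList result) "overall_risk" 0)).foldl max (PySem.Dict.getD (PySem.Dict.ofList r) "overall_risk" 0))
    unfold pvChanceOf at *
    split_ifs <;> omega
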